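-- pv_equiv track=rewrite | github.com/bot-Badass/ttcf | src/myth_pipeline.py | parse_myth_script
-- ===== SOURCE A (Python) =====
-- def parse_myth_script(script_text: str) -> list[dict]:
--     """Return list of sections: [{"query": ..., "text": ...}, ...]
--
--     Splits on ##bg: markers. Text between consecutive markers belongs to the
--     preceding marker. Lines that are blank or marker-only are excluded from text.
--     """
--     sections: list[dict] = []
--     current_query: str | None = None
--     current_lines: list[str] = []
--
--     for line in script_text.splitlines():
--         if line.startswith("##bg:"):
--             if current_lines and current_query is not None:
--                 sections.append({
--                     "query": current_query,
--                     "text": "\n".join(current_lines).strip(),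
--                 })
--             current_query = line[5:].strip()
--             current_lines = []
--         elif line.strip():
--             current_lines.append(line.strip())
--
--     if current_lines and current_query is not None:
--         sections.append({
--             "query": current_query,
--             "text": "\n".join(current_lines).strip(),
--         })
--
--     return sections
-- ===== SOURCE B (Python) =====
-- def parse_myth_script(script_text: str) -> list[dict]:
--     """Split the script into marker-delimited segments, then build each
--     section independently (segment partition instead of one stateful scan)."""
--     rest = _drop_to_marker(script_text.splitlines())
--     sections: list[dict] = []
--     while rest:
--         head, rest = rest[0], rest[1:]
--         seg, rest = _split_segment(rest)
--         body = [l.strip() for l in seg if l.strip()]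
--         if body:
--             sections.append({"query": head[5:].strip(),
--                              "text": "\n".join(body).strip()})
--     return sections
--
--
-- def _drop_to_marker(lines):
--     """Drop lines until the first ##bg: marker (or the end)."""
--     while lines and not lines[0].startswith("##bg:"):
--         lines = lines[1:]
--     return lines
--
--
-- def _split_segment(lines):
--     """Split off the lines before the next ##bg: marker."""
--     seg = []
--     while lines and not lines[0].startswith("##bg:"):
--         seg.append(lines[0])
--         lines = lines[1:]
--     return seg, lines
-- ===== Notes on version B (the rewrite author's own statement) =====
-- stated objective: alternative
-- what changed: B partitions the line list into marker-delimited segments first and then builds each section from its (marker, segment) pair independently, instead of A's single stateful scan carrying current_query/current_lines and a trailing flush.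
import Mathlib
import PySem

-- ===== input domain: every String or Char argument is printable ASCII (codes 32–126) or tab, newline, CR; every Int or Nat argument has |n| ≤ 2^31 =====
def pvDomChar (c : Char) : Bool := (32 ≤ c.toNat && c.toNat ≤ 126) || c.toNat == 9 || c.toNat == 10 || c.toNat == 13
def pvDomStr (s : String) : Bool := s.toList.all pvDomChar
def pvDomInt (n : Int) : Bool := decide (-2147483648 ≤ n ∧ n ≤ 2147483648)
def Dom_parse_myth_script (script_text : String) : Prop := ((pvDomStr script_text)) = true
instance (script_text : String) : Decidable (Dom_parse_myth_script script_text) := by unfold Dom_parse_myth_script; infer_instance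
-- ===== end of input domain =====

-- B replaces A's single stateful scan (current_query/current_lines + trailing flush) by a
-- partition of the lines into marker-delimited segments, each section built independently.

-- ===== PORT A =====
-- the conditional append A performs at a marker and after the loop
def pvFlushA (q : Option String) (cur : List String) : List (List (String × String)) :=
  match q with
  | none => []
  | some qq => if cur = [] then [] else
      [[("query", qq), ("text", PySem.Str.strip (PySem.Str.join "\n" cur))]]

-- A's for-loop over splitlines, state = (sections, current_query, current_lines)
def pvLoopA : List String → List (List (String × String)) → Option String → List String →
    List (List (String × String))
  | [], sections, q, cur => sections ++ pvFlushA q cur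
  | l :: ls, sections, q, cur =>
    if PySem.Str.startswith l "##bg:" then
      pvLoopA ls (sections ++ pvFlushA q cur)
        (some (PySem.Str.strip (PySem.Str.slice l (some 5) none))) []
    else if PySem.Str.strip l ≠ "" then
      pvLoopA ls sections q (cur ++ [PySem.Str.strip l])
    else
      pvLoopA ls sections q cur

def parse_myth_script (script_text : String) : List (List (String × String)) :=
  pvLoopA (PySem.Str.splitlines script_text) [] none []

-- ===== PORT B =====
def pvIsMark (l : String) : Bool := PySem.Str.startswith l "##bg:"

-- _drop_to_marker: drop lines until the first ##bg: marker
def pvDropToMark : List String → List String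
  | [] => []
  | l :: ls => if pvIsMark l then l :: ls else pvDropToMark ls

-- _split_segment: split off the lines before the next ##bg: marker
def pvSplitSeg : List String → List String × List String
  | [] => ([], [])
  | l :: ls =>
    if pvIsMark l then ([], l :: ls)
    else
      let p := pvSplitSeg ls
      (l :: p.1, p.2)

theorem pvSplitSeg_snd_len_le (ls : List String) : (pvSplitSeg ls).2.length ≤ ls.length := by
  induction ls with
  | nil => simp [pvSplitSeg]
  | cons l ls ih =>
    simp only [pvSplitSeg]
    split
    · simp
    · simpa using Nat.le_succ_of_le ih

-- the while-loop of B's parse_myth_script, consuming one (marker, segment) pair per step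
def pvSections : List String → List (List (String × String))
  | [] => []
  | head :: rest =>
    let p := pvSplitSeg rest
    let body := p.1.filterMap (fun l =>
      let s := PySem.Str.strip l; if s = "" then none else some s)
    (if body = [] then [] else
      [[("query", PySem.Str.strip (PySem.Str.slice head (some 5) none)),
        ("text", PySem.Str.strip (PySem.Str.join "\n" body))]]) ++ pvSections p.2
  termination_by ls => ls.length
  decreasing_by
    have := pvSplitSeg_snd_len_le rest
    simpa using Nat.lt_succ_of_le this

def parse_myth_script_alt (script_text : String) : List (List (String × String)) :=
  pvSections (pvDropToMark (PySem.Str.splitlines script_text))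

-- ===== PRECONDITION & SPEC =====
def Spec_parse_myth_script (script_text : String) (out : List (List (String × String))) : Prop := out = parse_myth_script_alt script_text
instance (script_text : String) (out : List (List (String × String))) : Decidable (Spec_parse_myth_script script_text out) := by unfold Spec_parse_myth_script; infer_instance

-- ===== CLAIM (what is proved, stated in full; the proofs are below) =====
def Claim_equal_parse_myth_script : Prop := ∀ (script_text : String), Dom_parse_myth_script script_text → Spec_parse_myth_script script_text (parse_myth_script script_text)

-- ===== LEMMAS AND PROOFS =====
theorem pvLoopA_append (ls : List String) (s : List (List (String × String)))
    (q : Option String) (cur : List String) :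
    pvLoopA ls s q cur = s ++ pvLoopA ls [] q cur := by
  induction ls generalizing s q cur with
  | nil => simp [pvLoopA]
  | cons l ls ih =>
    simp only [pvLoopA]
    split
    · rw [ih, ih ([] ++ pvFlushA q cur)]; simp
    · split <;> rw [ih]

theorem pvLoopA_some (ls : List String) (q : String) (cur : List String) :
    pvLoopA ls [] (some q) cur =
      (let body := cur ++ (pvSplitSeg ls).1.filterMap (fun l =>
          let s := PySem.Str.strip l; if s = "" then none else some s);
       if body = [] then [] else
        [[("query", q), ("text", PySem.Str.strip (PySem.Str.join "\n" body))]]) ++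
      pvSections (pvSplitSeg ls).2 := by
  induction ls generalizing q cur with
  | nil => simp [pvLoopA, pvFlushA, pvSplitSeg, pvSections]
  | cons l ls ih =>
    simp only [pvLoopA, pvSplitSeg, pvIsMark]
    split
    · rename_i hm
      rw [pvLoopA_append, ih _ []]
      simp [pvFlushA, pvSections]
    · rename_i hm
      split
      · rename_i hs
        rw [ih q (cur ++ [PySem.Str.strip l])]
        simp [hs]
      · rename_i hs
        rw [ih q cur]
        simp only [ne_eq, not_not] at hs
        simp [hs]

theorem pvLoopA_none (ls : List String) (cur : List String) :
    pvLoopA ls [] none cur = pvSections (pvDropToMark ls) := by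
  induction ls generalizing cur with
  | nil => simp [pvLoopA, pvFlushA, pvDropToMark, pvSections]
  | cons l ls ih =>
    simp only [pvLoopA, pvDropToMark, pvIsMark]
    split
    · rename_i hm
      rw [pvLoopA_append, pvLoopA_some]
      simp [pvFlushA, pvSections]
    · split <;> exact ih _

-- ===== VERDICT (by name: the statement is the Claim_ definition above) =====
theorem parse_myth_script_spec : Claim_equal_parse_myth_script := by
  intro s _
  unfold Spec_parse_myth_script parse_myth_script parse_myth_script_alt
  exact pvLoopA_none _ _
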